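-- pv_equiv track=rewrite | github.com/Gionano/AI-From-Scratch-Lab | own_ai_model/inference.py | _resolve_feature_indexes
-- ===== SOURCE A (Python) =====
-- def _resolve_feature_indexes(header: list[str]) -> tuple[int, int]:
--     normalized_header = [column.strip().lower() for column in header]
--     x_aliases = ["x", "feature_1", "feature1", "input_1", "input1"]
--     y_aliases = ["y", "feature_2", "feature2", "input_2", "input2"]
--
--     x_index = next((normalized_header.index(alias) for alias in x_aliases if alias in normalized_header), None)
--     y_index = next((normalized_header.index(alias) for alias in y_aliases if alias in normalized_header), None)
--
--     if x_index is None or y_index is None: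
--         if len(header) < 2:
--             raise ValueError("Prediction input files must contain at least two columns.")
--         return 0, 1
--
--     return x_index, y_index
-- ===== SOURCE B (Python) =====
-- def _resolve_feature_indexes(header: list[str]) -> tuple[int, int]:
--     # Single pass over the header: for each column, look up its alias rank in
--     # each family's priority table and keep the lowest-rank hit (strict '<'
--     # keeps the first occurrence of the best-ranked alias).
--     x_rank = {"x": 0, "feature_1": 1, "feature1": 2, "input_1": 3, "input1": 4}
--     y_rank = {"y": 0, "feature_2": 1, "feature2": 2, "input_2": 3, "input2": 4}
--     best_x = None
--     best_y = None
--     for i, column in enumerate(header):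
--         name = column.strip().lower()
--         r = x_rank.get(name)
--         if r is not None and (best_x is None or r < best_x[0]):
--             best_x = (r, i)
--         r = y_rank.get(name)
--         if r is not None and (best_y is None or r < best_y[0]):
--             best_y = (r, i)
--     if best_x is None or best_y is None:
--         if len(header) < 2:
--             raise ValueError("Prediction input files must contain at least two columns.")
--         return 0, 1
--     return best_x[1], best_y[1]
-- ===== Notes on version B (the rewrite author's own statement) =====
-- stated objective: alternative
-- what changed: Replaces A's per-alias membership scans and list.index passes with a single enumerate pass over the header that keeps, per alias family, the lowest-priority-rank hit (strict < preserves first occurrence), using precomputed alias-to-rank dicts; same cost in practice since normalization dominates.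
import Mathlib
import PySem

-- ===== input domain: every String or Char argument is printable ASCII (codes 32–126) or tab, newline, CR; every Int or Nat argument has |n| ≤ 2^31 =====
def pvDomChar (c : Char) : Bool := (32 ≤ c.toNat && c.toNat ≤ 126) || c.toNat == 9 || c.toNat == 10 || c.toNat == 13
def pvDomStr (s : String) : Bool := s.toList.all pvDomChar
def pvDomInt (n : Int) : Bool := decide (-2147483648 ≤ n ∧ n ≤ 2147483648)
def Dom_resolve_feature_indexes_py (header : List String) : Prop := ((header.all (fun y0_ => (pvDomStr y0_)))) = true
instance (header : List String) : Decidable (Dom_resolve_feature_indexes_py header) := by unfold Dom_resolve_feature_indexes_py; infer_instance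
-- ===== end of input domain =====

-- B replaces A's per-alias list scans (membership + list.index per alias) by a SINGLE pass over
-- the header: each column's alias rank is looked up in a priority table and the lowest-rank hit
-- is kept (strict '<' keeps the first occurrence of the best-ranked alias). Objective: alternative
-- (a genuinely different single-pass algorithm of similar measured cost).
-- Both programs raise ValueError exactly when header has fewer than two columns and no alias pair
-- is found; Pre_ excludes headers of fewer than two columns (on which alone A can raise).

-- ===== PORT A =====
-- column.strip().lower()
def pyNormA (column : String) : String := PySem.Str.lower (PySem.Str.strip column)

-- next((normalized.index(alias) for alias in aliases if alias in normalized), None)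
def nextIndexA (normalized : List String) : List String → Option Int
  | [] => none
  | a :: rest =>
      if a ∈ normalized then (PySem.List.index? normalized a).map (fun n : Nat => (n : Int))
      else nextIndexA normalized rest

def resolve_feature_indexes_py (header : List String) : Int × Int :=
  let normalized := header.map pyNormA
  let x_index := nextIndexA normalized ["x", "feature_1", "feature1", "input_1", "input1"]
  let y_index := nextIndexA normalized ["y", "feature_2", "feature2", "input_2", "input2"]
  match x_index, y_index with
  | some x, some y => (x, y)
  | _, _ => (0, 1)   -- Python raises here when len(header) < 2; excluded by Pre_

-- ===== PORT B =====
-- column.strip().lower()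
def pyNorm (column : String) : String := PySem.Str.lower (PySem.Str.strip column)

-- the alias-priority dict literals x_rank / y_rank
def xRankDict : PySem.Dict String Int :=
  (((((PySem.Dict.empty.insert "x" 0).insert "feature_1" 1).insert "feature1" 2).insert "input_1" 3).insert "input1" 4)
def yRankDict : PySem.Dict String Int :=
  (((((PySem.Dict.empty.insert "y" 0).insert "feature_2" 1).insert "feature2" 2).insert "input_2" 3).insert "input2" 4)

-- r = rank.get(name); if r is not None and (best is None or r < best[0]): best = (r, i)
def stepFamily (rank : PySem.Dict String Int) (best : Option (Int × Int)) (name : String) (i : Int) : Option (Int × Int) :=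
  match PySem.Dict.get? rank name with
  | none => best
  | some r =>
      match best with
      | none => some (r, i)
      | some b => if r < b.1 then some (r, i) else some b

def resolve_feature_indexes_py_alt (header : List String) : Int × Int :=
  let st := (PySem.List.enumerate header).foldl
    (fun st p =>
      let name := pyNorm p.2
      (stepFamily xRankDict st.1 name p.1, stepFamily yRankDict st.2 name p.1))
    (none, none)
  match st with
  | (some bx, some bY) => (bx.2, bY.2)
  | (some _, none) => (0, 1)   -- Python raises here when len(header) < 2; excluded by Pre_
  | (none, _) => (0, 1)

-- ===== PRECONDITION & SPEC =====
-- A (and B) raise ValueError exactly when the header has fewer than two columns (and no alias pair found).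
def Pre_resolve_feature_indexes_py (header : List String) : Prop := 2 ≤ header.length
instance (header : List String) : Decidable (Pre_resolve_feature_indexes_py header) := by
  unfold Pre_resolve_feature_indexes_py; infer_instance

def pvWitness_resolve_feature_indexes_py : List String := ["x", "y"]

def Spec_resolve_feature_indexes_py (header : List String) (out : Int × Int) : Prop :=
  out = resolve_feature_indexes_py_alt header
instance (header : List String) (out : Int × Int) : Decidable (Spec_resolve_feature_indexes_py header out) := by
  unfold Spec_resolve_feature_indexes_py; infer_instance

-- ===== CLAIM (what is proved, stated in full; the proofs are below) =====
def Claim_equal_resolve_feature_indexes_py : Prop :=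
  ∀ (header : List String), Dom_resolve_feature_indexes_py header →
    Pre_resolve_feature_indexes_py header →
    Spec_resolve_feature_indexes_py header (resolve_feature_indexes_py header)

-- ===== LEMMAS AND PROOFS =====

-- the best (rank, first index) pair for an alias priority list al over a normalized header
def specR (norm : List String) : List String → Option (Int × Int)
  | [] => none
  | a :: rest =>
      if a ∈ norm then some (0, (((PySem.List.index? norm a).getD 0 : Nat) : Int))
      else (specR norm rest).map (fun b => (b.1 + 1, b.2))

-- one step of B's loop, abstracted over the rank lookup result
def updStep (best : Option (Int × Int)) (rc : Option Int) (n : Int) : Option (Int × Int) :=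
  match rc with
  | none => best
  | some r =>
      match best with
      | none => some (r, n)
      | some b => if r < b.1 then some (r, n) else some b

theorem stepFamily_eq_updStep (rank : PySem.Dict String Int) (best : Option (Int × Int)) (name : String) (i : Int) :
    stepFamily rank best name i = updStep best (PySem.Dict.get? rank name) i := rfl

def xAliases : List String := ["x", "feature_1", "feature1", "input_1", "input1"]
def yAliases : List String := ["y", "feature_2", "feature2", "input_2", "input2"]

-- the rank dicts realise first-index lookup in the alias priority lists
theorem get?_xRank (s : String) :
    PySem.Dict.get? xRankDict s = (PySem.List.index? xAliases s).map (fun n : Nat => (n : Int)) := by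
  by_cases h1 : s = "x"
  · subst h1; decide
  by_cases h2 : s = "feature_1"
  · subst h2; decide
  by_cases h3 : s = "feature1"
  · subst h3; decide
  by_cases h4 : s = "input_1"
  · subst h4; decide
  by_cases h5 : s = "input1"
  · subst h5; decide
  have hx : PySem.Dict.get? xRankDict s = none := by
    simp [xRankDict, PySem.Dict.get?_insert, h1, h2, h3, h4, h5]
  have hi : PySem.List.index? xAliases s = none :=
    (PySem.List.index?_eq_none_iff _ _).mpr (by simp [xAliases, h1, h2, h3, h4, h5])
  rw [hx, hi]
  rfl

theorem get?_yRank (s : String) :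
    PySem.Dict.get? yRankDict s = (PySem.List.index? yAliases s).map (fun n : Nat => (n : Int)) := by
  by_cases h1 : s = "y"
  · subst h1; decide
  by_cases h2 : s = "feature_2"
  · subst h2; decide
  by_cases h3 : s = "feature2"
  · subst h3; decide
  by_cases h4 : s = "input_2"
  · subst h4; decide
  by_cases h5 : s = "input2"
  · subst h5; decide
  have hx : PySem.Dict.get? yRankDict s = none := by
    simp [yRankDict, PySem.Dict.get?_insert, h1, h2, h3, h4, h5]
  have hi : PySem.List.index? yAliases s = none :=
    (PySem.List.index?_eq_none_iff _ _).mpr (by simp [yAliases, h1, h2, h3, h4, h5])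
  rw [hx, hi]
  rfl

theorem specR_nonneg (norm : List String) : ∀ (al : List String) (b : Int × Int),
    specR norm al = some b → 0 ≤ b.1 := by
  intro al
  induction al with
  | nil => intro b h; simp [specR] at h
  | cons a rest ih =>
      intro b h
      by_cases hm : a ∈ norm
      · rw [specR, if_pos hm] at h
        injection h with h
        subst h
        simp
      · rw [specR, if_neg hm] at h
        cases hsp : specR norm rest with
        | none => rw [hsp] at h; cases h
        | some b' =>
            rw [hsp] at h
            injection h with h
            subst h
            have := ih b' hsp
            simp
            omega

-- key step: appending one normalized column updates the spec exactly like B's loop body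
theorem specR_append (norm : List String) (c : String) : ∀ (al : List String), al.Nodup →
    specR (norm ++ [c]) al =
      updStep (specR norm al) ((PySem.List.index? al c).map (fun n : Nat => (n : Int))) (norm.length : Int) := by
  intro al
  induction al with
  | nil =>
      intro _
      have h0 : PySem.List.index? ([] : List String) c = none :=
        (PySem.List.index?_eq_none_iff _ _).mpr (by simp)
      rw [h0]
      rfl
  | cons a rest ih =>
      intro hnd
      have hanr : a ∉ rest := (List.nodup_cons.mp hnd).1
      have hndr : rest.Nodup := (List.nodup_cons.mp hnd).2
      by_cases hm : a ∈ norm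
      · -- a already present: its first index is unchanged and its rank 0 can never be beaten
        have hm' : a ∈ norm ++ [c] := List.mem_append_left _ hm
        have hidx : PySem.List.index? (norm ++ [c]) a = PySem.List.index? norm a :=
          PySem.List.index?_append_of_mem [c] hm
        simp only [specR, if_pos hm, if_pos hm', hidx]
        by_cases hca : c = a
        · subst hca
          rw [PySem.List.index?_cons_self]
          simp [updStep]
        · rw [PySem.List.index?_cons_of_ne rest (Ne.symm hca)]
          cases hrc : PySem.List.index? rest c with
          | none => rfl
          | some k =>
              simp only [Option.map_some, updStep]
              split_ifs with h
              · exfalso; omega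
              · rfl
      · by_cases hca : c = a
        · -- the new column IS this alias (rank 0): it always wins
          subst hca
          have hm' : c ∈ norm ++ [c] := List.mem_append_right _ (by simp)
          have hidx : PySem.List.index? (norm ++ [c]) c = some norm.length :=
            PySem.List.index?_append_singleton_self norm c hm
          rw [PySem.List.index?_cons_self]
          simp only [specR, if_pos hm', if_neg hm, hidx]
          cases hsp : specR norm rest with
          | none => rfl
          | some b =>
              have hb := specR_nonneg norm rest b hsp
              have hlt : (0 : Int) < b.1 + 1 := by omega
              simp [updStep, hlt]
        · -- the new column is not this alias: recurse, shifting ranks by one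
          have hm' : a ∉ norm ++ [c] := by
            simp only [List.mem_append, List.mem_singleton]
            rintro (h | h)
            · exact hm h
            · exact hca h.symm
          rw [PySem.List.index?_cons_of_ne rest (Ne.symm hca)]
          have hLHS : specR (norm ++ [c]) (a :: rest) =
              (specR (norm ++ [c]) rest).map (fun b => (b.1 + 1, b.2)) := by
            simp only [specR, if_neg hm']
          have hRHS : specR norm (a :: rest) = (specR norm rest).map (fun b => (b.1 + 1, b.2)) := by
            simp only [specR, if_neg hm]
          rw [hLHS, hRHS, ih hndr]
          cases hrc : PySem.List.index? rest c with
          | none => rfl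
          | some k =>
              cases hsp : specR norm rest with
              | none =>
                  simp only [updStep, Option.map_some]
                  norm_num
              | some b =>
                  simp only [updStep, Option.map_some]
                  have hiff : ((k : Int) < b.1) ↔ (((k + 1 : Nat) : Int) < b.1 + 1) := by
                    push_cast; omega
                  by_cases hlt : (k : Int) < b.1
                  · rw [if_pos hlt, if_pos (hiff.mp hlt)]
                    simp only [Option.map_some]
                    norm_num
                  · rw [if_neg hlt, if_neg (fun h => hlt (hiff.mpr h))]
                    rfl

-- the spec projects to A's next(...)-chain
theorem map_snd_specR (norm : List String) : ∀ (al : List String),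
    (specR norm al).map (fun b => b.2) = nextIndexA norm al := by
  intro al
  induction al with
  | nil => rfl
  | cons a rest ih =>
      by_cases hm : a ∈ norm
      · obtain ⟨n, hn⟩ := Option.isSome_iff_exists.mp ((PySem.List.index?_isSome_iff _ _).mpr hm)
        simp only [specR, nextIndexA, if_pos hm, hn, Option.getD_some, Option.map_some]
      · simp only [specR, nextIndexA, if_neg hm, Option.map_map]
        rw [← ih]
        rfl

-- B's fold computes the spec for both families
theorem fold_spec (header : List String) :
    (PySem.List.enumerate header).foldl
      (fun st p =>
        let name := pyNorm p.2
        (stepFamily xRankDict st.1 name p.1, stepFamily yRankDict st.2 name p.1))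
      (none, none)
    = (specR (header.map pyNorm) xAliases, specR (header.map pyNorm) yAliases) := by
  induction header using List.reverseRecOn with
  | nil => simp [PySem.List.enumerate, specR, xAliases, yAliases]
  | append_singleton hs c ih =>
      rw [PySem.List.enumerate_append, List.foldl_append, ih]
      simp only [PySem.List.enumerate_cons, PySem.List.enumerate_nil, List.foldl_cons,
        List.foldl_nil, List.map_append, List.map_cons, List.map_nil]
      rw [stepFamily_eq_updStep, stepFamily_eq_updStep, get?_xRank, get?_yRank]
      rw [specR_append _ _ xAliases (by decide), specR_append _ _ yAliases (by decide)]
      simp [List.length_map]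

-- ===== VERDICT (by name: the statement is the Claim_ definition above) =====
theorem resolve_feature_indexes_py_spec : Claim_equal_resolve_feature_indexes_py := by
  intro header _ _
  unfold Spec_resolve_feature_indexes_py
  have hAB : pyNormA = pyNorm := rfl
  have hx := (map_snd_specR (header.map pyNorm) xAliases).symm
  have hy := (map_snd_specR (header.map pyNorm) yAliases).symm
  simp only [xAliases, yAliases] at hx hy
  simp only [resolve_feature_indexes_py, resolve_feature_indexes_py_alt, fold_spec, hAB,
    xAliases, yAliases, hx, hy]
  cases specR (List.map pyNorm header) ["x", "feature_1", "feature1", "input_1", "input1"] <;>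
    cases specR (List.map pyNorm header) ["y", "feature_2", "feature2", "input_2", "input2"] <;> rfl
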